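-- pv_equiv track=rewrite | github.com/pierre-emery/bioinfo-sequence-assembly | base_python_tp1/prefixe_suffixe.py | meilleur_score_derniere_ligne
-- ===== SOURCE A (Python) =====
-- def meilleur_score_derniere_ligne(V):
--     """
--     Une fonction qui prend en argument la table des scores V.
--
--     Elle parcourt la dernière ligne (i = m) pour trouver le meilleur score et
--     la position j_etoile correspondante.
--
--     Rend un couple (meilleur_score, j_etoile).
--     """
--     derniere = V[-1]
--     meilleur = derniere[0]
--     j_etoile = 0
--     for j in range(1, len(derniere)):
--         if derniere[j] > meilleur:
--             meilleur = derniere[j]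
--             j_etoile = j
--     return meilleur, j_etoile
-- ===== SOURCE B (Python) =====
-- def meilleur_score_derniere_ligne(V):
--     derniere = V[-1]
--     def best(lo, hi):
--         # (max, first index) of derniere[lo:hi] (hi - lo >= 1), by divide and conquer;
--         # on a tie the left half wins, so the first occurrence is kept.
--         if hi - lo == 1:
--             return derniere[lo], lo
--         mid = (lo + hi) // 2
--         m1, j1 = best(lo, mid)
--         m2, j2 = best(mid, hi)
--         if m2 <= m1:
--             return m1, j1
--         return m2, j2
--     return best(0, len(derniere))
-- ===== Notes on version B (the rewrite author's own statement) =====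
-- stated objective: alternative
-- what changed: Replaces A's sequential track-(max,index) loop with a divide-and-conquer recursion that splits the row in halves, computes each half's best and merges with a left-biased comparison, preserving first-occurrence ties.
import Mathlib
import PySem

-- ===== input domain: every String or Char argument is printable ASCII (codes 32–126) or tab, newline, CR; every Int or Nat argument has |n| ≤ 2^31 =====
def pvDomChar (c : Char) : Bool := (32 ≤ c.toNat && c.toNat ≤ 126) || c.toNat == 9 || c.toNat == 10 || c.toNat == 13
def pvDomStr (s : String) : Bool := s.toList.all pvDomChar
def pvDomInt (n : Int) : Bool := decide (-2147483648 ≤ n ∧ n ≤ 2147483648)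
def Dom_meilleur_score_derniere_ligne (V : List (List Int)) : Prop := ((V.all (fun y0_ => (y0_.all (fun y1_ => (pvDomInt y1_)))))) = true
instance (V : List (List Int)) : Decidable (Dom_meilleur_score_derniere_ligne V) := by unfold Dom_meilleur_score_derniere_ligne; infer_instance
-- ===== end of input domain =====

-- B replaces A's sequential track-both loop by a divide-and-conquer recursion on the row (alternative algorithm, same cost; return value only).

-- ===== PORT A =====
-- A: derniere = V[-1]; meilleur = derniere[0]; j_etoile = 0;
--    for j in range(1, len(derniere)): if derniere[j] > meilleur: update both; return (meilleur, j_etoile)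
def meilleur_score_derniere_ligne (V : List (List Int)) : Int × Int :=
  let derniere := PySem.List.pyGetD V (-1) []
  let meilleur := PySem.List.pyGetD derniere 0 0
  (PySem.List.pyRange 1 (derniere.length : Int) 1).foldl
    (fun (st : Int × Int) (j : Int) =>
      if st.1 < PySem.List.pyGetD derniere j 0 then (PySem.List.pyGetD derniere j 0, j) else st)
    (meilleur, 0)

-- ===== PORT B =====
-- B's helper best(lo,hi): if hi-lo==1 return (derniere[lo], lo); mid=(lo+hi)//2;
-- merge the two halves' results with a left-biased comparison.
-- (The fuel argument and the guard 'hi ≤ lo + 1' only make the recursion total: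
-- with fuel = len(derniere) the fuel never runs out and the guard coincides with
-- Python's hi-lo==1 test, since every reachable call has lo < hi ≤ lo + 1 + fuel.
-- derniere[lo] with 0 ≤ lo < len is List.getD, and (lo+hi)//2 on these
-- non-negative ints is Nat division: both exact here.)
def pvBestB (l : List Int) : Nat → Nat → Nat → Int × Int
  | 0, lo, _ => (l.getD lo 0, (lo : Int))
  | fuel + 1, lo, hi =>
    if hi ≤ lo + 1 then (l.getD lo 0, (lo : Int))
    else
      let mid := (lo + hi) / 2
      let r1 := pvBestB l fuel lo mid
      let r2 := pvBestB l fuel mid hi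
      if r2.1 ≤ r1.1 then r1 else r2

def meilleur_score_derniere_ligne_alt (V : List (List Int)) : Int × Int :=
  let derniere := PySem.List.pyGetD V (-1) []
  pvBestB derniere derniere.length 0 derniere.length

-- ===== PRECONDITION & SPEC =====
-- A raises IndexError when V is empty (V[-1]) or when the last row is empty (derniere[0]); Pre_ excludes exactly those.
def Pre_meilleur_score_derniere_ligne (V : List (List Int)) : Prop := V.getLastD [] ≠ []
instance (V : List (List Int)) : Decidable (Pre_meilleur_score_derniere_ligne V) := by unfold Pre_meilleur_score_derniere_ligne; infer_instance
def pvWitness_meilleur_score_derniere_ligne : List (List Int) := [[1, 3, 2]]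

def Spec_meilleur_score_derniere_ligne (V : List (List Int)) (out : Int × Int) : Prop := out = meilleur_score_derniere_ligne_alt V
instance (V : List (List Int)) (out : Int × Int) : Decidable (Spec_meilleur_score_derniere_ligne V out) := by unfold Spec_meilleur_score_derniere_ligne; infer_instance

-- ===== CLAIM (what is proved, stated in full; the proofs are below) =====
def Claim_equal_meilleur_score_derniere_ligne : Prop := ∀ (V : List (List Int)), Dom_meilleur_score_derniere_ligne V → Pre_meilleur_score_derniere_ligne V → Spec_meilleur_score_derniere_ligne V (meilleur_score_derniere_ligne V)

-- ===== LEMMAS AND PROOFS =====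

-- A's loop invariant: after scanning indices 1..n-1 the state is (value at first argmax of the first n entries, that index).
lemma pv_invA (l : List Int) (x : Int) (hl : l.getD 0 0 = x) :
    ∀ n : Nat, n ≤ l.length →
    ∃ k : Nat,
      ((PySem.List.pyRange 1 (n : Int) 1).foldl
        (fun (st : Int × Int) (j : Int) =>
          if st.1 < PySem.List.pyGetD l j 0 then (PySem.List.pyGetD l j 0, j) else st)
        (x, 0))
      = (l.getD k 0, (k : Int)) ∧ k < max n 1 ∧
      (∀ i < n, l.getD i 0 ≤ l.getD k 0) ∧ (∀ i < k, l.getD i 0 < l.getD k 0) := by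
  intro n
  induction n with
  | zero =>
    intro _
    refine ⟨0, ?_, by omega, by omega, by omega⟩
    rw [show ((0:Nat):Int) = 0 from rfl, PySem.List.pyRange_one_eq_nil (by norm_num)]
    simp only [List.foldl_nil, hl]
  | succ n ih =>
    intro hlen
    rcases Nat.eq_zero_or_pos n with hn0 | hnpos
    · subst hn0
      refine ⟨0, ?_, by omega, ?_, by omega⟩
      · rw [show ((1:Nat):Int) = 1 from rfl, PySem.List.pyRange_one_eq_nil (by norm_num)]
        simp only [List.foldl_nil, hl]; norm_num
      · intro i hi; interval_cases i; exact le_refl _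
    · obtain ⟨k, hfold, hk, hle, hlt⟩ := ih (by omega)
      have hsplit : PySem.List.pyRange 1 ((n + 1 : Nat) : Int) 1
          = PySem.List.pyRange 1 (n : Int) 1 ++ [(n : Int)] := by
        have := PySem.List.pyRange_one_succ_right (a := 1) (b := (n : Int)) (by exact_mod_cast hnpos)
        push_cast
        convert this using 2
      rw [hsplit, List.foldl_append, hfold]
      simp only [List.foldl_cons, List.foldl_nil]
      have hget : PySem.List.pyGetD l ((n : Nat) : Int) 0 = l.getD n 0 :=
        PySem.List.pyGetD_natCast l n 0
      rw [hget]
      by_cases hc : l.getD k 0 < l.getD n 0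
      · refine ⟨n, ?_, by omega, ?_, ?_⟩
        · rw [if_pos hc]
        · intro i hi
          rcases Nat.lt_succ_iff_lt_or_eq.mp hi with h | h
          · exact le_trans (hle i h) (le_of_lt hc)
          · subst h; exact le_refl _
        · intro i hi
          exact lt_of_le_of_lt (hle i hi) hc
      · refine ⟨k, ?_, by omega, ?_, hlt⟩
        · rw [if_neg hc]
        · intro i hi
          rcases Nat.lt_succ_iff_lt_or_eq.mp hi with h | h
          · exact hle i h
          · subst h; exact not_lt.mp hc

-- B's divide and conquer computes (value at first argmax of l[lo:hi], that index).
lemma pv_bestB_spec (l : List Int) :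
    ∀ (fuel lo hi : Nat), hi - lo ≤ fuel + 1 → lo < hi → hi ≤ l.length →
    ∃ j : Nat, pvBestB l fuel lo hi = (l.getD j 0, (j : Int)) ∧ lo ≤ j ∧ j < hi ∧
      (∀ i, lo ≤ i → i < hi → l.getD i 0 ≤ l.getD j 0) ∧
      (∀ i, lo ≤ i → i < j → l.getD i 0 < l.getD j 0) := by
  intro fuel
  induction fuel with
  | zero =>
    intro lo hi hd hlt hle
    have hhi : hi = lo + 1 := by omega
    subst hhi
    exact ⟨lo, rfl, le_refl _, by omega, fun i h1 h2 => by
      have : i = lo := by omega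
      subst this; exact le_refl _, fun i h1 h2 => by omega⟩
  | succ d ih =>
    intro lo hi hd hlt hle
    by_cases hbase : hi ≤ lo + 1
    · rw [show pvBestB l (d + 1) lo hi = (l.getD lo 0, (lo : Int)) from by
        simp only [pvBestB, if_pos hbase]]
      exact ⟨lo, rfl, le_refl _, by omega, fun i h1 h2 => by
        have : i = lo := by omega
        subst this; exact le_refl _, fun i h1 h2 => by omega⟩
    · have h2 : lo + 2 ≤ hi := by omega
      set mid := (lo + hi) / 2 with hmid
      have hm1 : lo < mid := by omega
      have hm2 : mid < hi := by omega
      obtain ⟨j1, hB1, hlo1, hhi1, hle1, hlt1⟩ := ih lo mid (by omega) hm1 (by omega)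
      obtain ⟨j2, hB2, hlo2, hhi2, hle2, hlt2⟩ := ih mid hi (by omega) hm2 hle
      have hstep : pvBestB l (d + 1) lo hi =
          (if (pvBestB l d mid hi).1 ≤ (pvBestB l d lo mid).1
            then pvBestB l d lo mid else pvBestB l d mid hi) := by
        simp only [pvBestB, if_neg hbase]
        rw [hmid]
      rw [hstep, hB1, hB2]
      by_cases hc : l.getD j2 0 ≤ l.getD j1 0
      · rw [if_pos hc]
        refine ⟨j1, rfl, hlo1, by omega, ?_, ?_⟩
        · intro i hi1 hi2
          by_cases him : i < mid
          · exact hle1 i hi1 him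
          · exact le_trans (hle2 i (by omega) hi2) hc
        · intro i hi1 hi2
          exact hlt1 i hi1 hi2
      · rw [if_neg hc]
        rw [not_le] at hc
        refine ⟨j2, rfl, by omega, hhi2, ?_, ?_⟩
        · intro i hi1 hi2
          by_cases him : i < mid
          · exact le_trans (hle1 i hi1 him) (le_of_lt hc)
          · exact hle2 i (by omega) hi2
        · intro i hi1 hi2
          by_cases him : i < mid
          · exact lt_of_le_of_lt (hle1 i hi1 him) hc
          · exact hlt2 i (by omega) hi2

-- first argmax is unique
lemma pv_first_argmax_unique (l : List Int) (j k : Nat)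
    (hj : j < l.length) (hk : k < l.length)
    (hjle : ∀ i < l.length, l.getD i 0 ≤ l.getD j 0) (hjlt : ∀ i < j, l.getD i 0 < l.getD j 0)
    (hkle : ∀ i < l.length, l.getD i 0 ≤ l.getD k 0) (hklt : ∀ i < k, l.getD i 0 < l.getD k 0) :
    j = k := by
  rcases Nat.lt_trichotomy j k with h | h | h
  · have h1 := hklt j h
    have h2 := hjle k hk
    omega
  · exact h
  · have h1 := hjlt k h
    have h2 := hkle j hj
    omega

-- ===== VERDICT (by name: the statement is the Claim_ definition above) =====
theorem meilleur_score_derniere_ligne_spec : Claim_equal_meilleur_score_derniere_ligne := by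
  intro V _ hpre
  unfold Spec_meilleur_score_derniere_ligne
  unfold Pre_meilleur_score_derniere_ligne at hpre
  unfold meilleur_score_derniere_ligne meilleur_score_derniere_ligne_alt
  have hVne : V ≠ [] := by
    intro h; subst h; simp at hpre
  have hlastD : PySem.List.pyGetD V (-1) ([] : List Int) = V.getLastD [] := by
    rw [PySem.List.pyGetD_neg_one V [] hVne, List.getLastD_eq_getLast?, List.getLast?_eq_some_getLast hVne]
    simp
  set l : List Int := V.getLastD [] with hldef
  simp only [hlastD]
  have hlne : l ≠ [] := hpre
  have hget0 : PySem.List.pyGetD l 0 0 = l.getD 0 0 := PySem.List.pyGetD_natCast l 0 0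
  obtain ⟨k, hfold, hk, hleA, hltA⟩ :=
    pv_invA l (l.getD 0 0) rfl l.length (le_refl _)
  have hlen : 0 < l.length := List.length_pos_iff.mpr hlne
  have hklen : k < l.length := by omega
  obtain ⟨j, hB, _, hj, hleB', hltB'⟩ := pv_bestB_spec l l.length 0 l.length (by omega) hlen (le_refl _)
  have hleB : ∀ i < l.length, l.getD i 0 ≤ l.getD j 0 := fun i hi => hleB' i (Nat.zero_le _) hi
  have hltB : ∀ i < j, l.getD i 0 < l.getD j 0 := fun i hi => hltB' i (Nat.zero_le _) hi
  have hle' : ∀ i < l.length, l.getD i 0 ≤ l.getD k 0 := hleA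
  have hjk : j = k := pv_first_argmax_unique l j k hj hklen hleB hltB hle' hltA
  rw [hget0, hfold, hB, hjk]
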